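-- pv_equiv track=rewrite | github.com/N1colaxx/Cursos | Curso_em_Video/python/Mundo_2/Exercicios/ex062.py | add_nu
-- ===== SOURCE A (Python) =====
-- def add_nu(novo_nu, t, r):
--     lista = []
--     l_nt = []
--
--     novo_nu = int(novo_nu)
--     loop = 10 + novo_nu
--
--     for i in range(loop):
--         res_pa = t + (i * r)
--         lista.append(res_pa)
--
--         if i >= 10:
--             l_nt.append(res_pa)
--     return lista, l_nt
-- ===== SOURCE B (Python) =====
-- def add_nu(novo_nu, t, r):
--     # alternative: incremental accumulation (cur += r) and an independent build of the
--     # second list from its own start t + 10*r, instead of A's single guarded loop.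
--     n = 10 + int(novo_nu)
--     lista = []
--     cur = t
--     for _ in range(n):
--         lista.append(cur)
--         cur += r
--     l_nt = []
--     cur = t + 10 * r
--     for _ in range(n - 10):
--         l_nt.append(cur)
--         cur += r
--     return lista, l_nt
-- ===== Notes on version B (the rewrite author's own statement) =====
-- stated objective: alternative
-- what changed: B replaces A's single indexed loop with a per-step multiplication and a conditional append by two independent incremental builds: each list is generated by a running accumulator (cur += r) from its own start value (t, and t+10*r for the tail), with no index arithmetic and no branch.
import Mathlib
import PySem

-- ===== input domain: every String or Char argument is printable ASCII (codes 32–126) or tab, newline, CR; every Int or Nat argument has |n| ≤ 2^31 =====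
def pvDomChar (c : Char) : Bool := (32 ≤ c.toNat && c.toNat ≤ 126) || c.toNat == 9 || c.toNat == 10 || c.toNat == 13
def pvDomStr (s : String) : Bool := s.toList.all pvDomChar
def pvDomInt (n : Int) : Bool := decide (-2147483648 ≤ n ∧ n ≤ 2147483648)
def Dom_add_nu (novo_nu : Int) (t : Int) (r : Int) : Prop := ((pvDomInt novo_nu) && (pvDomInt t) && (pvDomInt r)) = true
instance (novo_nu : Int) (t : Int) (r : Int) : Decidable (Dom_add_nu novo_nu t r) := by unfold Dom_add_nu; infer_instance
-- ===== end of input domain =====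

-- B builds each list independently by a running accumulator (cur += r) from its own start value, replacing A's guarded indexed loop (alternative decomposition; same cost).


-- ===== PORT A =====
def add_nu (novo_nu : Int) (t : Int) (r : Int) : List Int × List Int :=
  let loop := 10 + novo_nu
  (PySem.List.pyRange 0 loop 1).foldl
    (fun (st : List Int × List Int) i =>
      let res_pa := t + i * r
      let lista := st.1 ++ [res_pa]
      let l_nt := if 10 ≤ i then st.2 ++ [res_pa] else st.2
      (lista, l_nt))
    ([], [])

-- ===== PORT B =====
-- B's loop body 'lista.append(cur); cur += r' (the loop index is unused)
def add_nu_alt (novo_nu : Int) (t : Int) (r : Int) : List Int × List Int :=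
  let n := 10 + novo_nu
  let step := fun (st : List Int × Int) (_ : Int) => (st.1 ++ [st.2], st.2 + r)
  let p1 := (PySem.List.pyRange 0 n 1).foldl step ([], t)
  let p2 := (PySem.List.pyRange 0 (n - 10) 1).foldl step ([], t + 10 * r)
  (p1.1, p2.1)

-- ===== PRECONDITION & SPEC =====
def Spec_add_nu (novo_nu : Int) (t : Int) (r : Int) (out : List Int × List Int) : Prop := out = add_nu_alt novo_nu t r
instance (novo_nu : Int) (t : Int) (r : Int) (out : List Int × List Int) : Decidable (Spec_add_nu novo_nu t r out) := by unfold Spec_add_nu; infer_instance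

-- ===== CLAIM (what is proved, stated in full; the proofs are below) =====
def Claim_equal_add_nu : Prop := ∀ (novo_nu : Int) (t : Int) (r : Int), Dom_add_nu novo_nu t r → Spec_add_nu novo_nu t r (add_nu novo_nu t r)

-- ===== LEMMAS AND PROOFS =====

-- A's loop, characterised: the fold appends the mapped range to lista and the mapped ≥10-filter to l_nt.
theorem add_nu_fold_char (t r : Int) (L : List Int) (a b : List Int) :
    L.foldl
      (fun (st : List Int × List Int) i =>
        let res_pa := t + i * r
        let lista := st.1 ++ [res_pa]
        let l_nt := if 10 ≤ i then st.2 ++ [res_pa] else st.2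
        (lista, l_nt))
      (a, b)
    = (a ++ L.map (fun i => t + i * r),
       b ++ (L.filter (fun i => decide (10 ≤ i))).map (fun i => t + i * r)) := by
  induction L generalizing a b with
  | nil => simp
  | cons x xs ih =>
    simp only [List.foldl_cons, List.map_cons, List.filter_cons]
    by_cases h : (10 : Int) ≤ x <;> simp [h, ih]

-- B's loop, characterised: folding the accumulator step over range(a,b) produces the
-- progression starting at c (term for index i is c + (i-a)*r).
theorem add_nu_alt_fold_char (r : Int) : ∀ (n : Nat) (a b : Int), (b - a).toNat = n →
    ∀ (acc : List Int) (c : Int),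
    (PySem.List.pyRange a b 1).foldl
      (fun (st : List Int × Int) (_ : Int) => (st.1 ++ [st.2], st.2 + r)) (acc, c)
    = (acc ++ (PySem.List.pyRange a b 1).map (fun i => c + (i - a) * r),
       c + ((b - a).toNat : Int) * r) := by
  intro n
  induction n with
  | zero =>
    intro a b hn acc c
    have hba : b ≤ a := by omega
    rw [PySem.List.pyRange_one_eq_nil hba]
    simp [hn]
  | succ m ih =>
    intro a b hn acc c
    have hab : a < b := by omega
    rw [PySem.List.pyRange_one_cons hab]
    simp only [List.foldl_cons, List.map_cons]
    rw [ih (a + 1) b (by omega) (acc ++ [c]) (c + r)]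
    have h1 : ((b - a).toNat : Int) = b - a := by omega
    have h2 : ((b - (a + 1)).toNat : Int) = b - a - 1 := by omega
    refine Prod.ext ?_ ?_
    · simp only [List.append_assoc, List.cons_append, List.nil_append]
      congr 1
      congr 1
      · ring_nf
      · apply List.map_congr_left; intro i _; ring
    · simp only
      rw [h1, h2]; ring

-- ===== VERDICT (by name: the statement is the Claim_ definition above) =====

theorem add_nu_spec : Claim_equal_add_nu := by
  intro novo_nu t r _
  unfold Spec_add_nu add_nu add_nu_alt
  simp only [add_nu_fold_char, List.nil_append]
  rw [add_nu_alt_fold_char r _ 0 (10 + novo_nu) rfl [] t,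
      add_nu_alt_fold_char r _ 0 (10 + novo_nu - 10) rfl [] (t + 10 * r)]
  simp only [List.nil_append]
  refine Prod.ext ?_ ?_
  · dsimp only
    apply List.map_congr_left; intro i _; ring
  · dsimp only
    by_cases h : 10 + novo_nu ≤ 10
    · have hnil : (PySem.List.pyRange 0 (10 + novo_nu) 1).filter (fun i => decide (10 ≤ i)) = [] := by
        rw [List.filter_eq_nil_iff]
        intro x hx
        have := (PySem.List.mem_pyRange_one).1 hx
        simp; omega
      have hnil2 : PySem.List.pyRange 0 (10 + novo_nu - 10) 1 = [] :=
        PySem.List.pyRange_one_eq_nil (by omega)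
      rw [hnil, hnil2]; simp
    · rw [PySem.List.pyRange_one_append 0 10 (10 + novo_nu) (by omega) (by omega)]
      have h1 : (PySem.List.pyRange 0 10 1).filter (fun i => decide (10 ≤ i)) = [] := by
        rw [List.filter_eq_nil_iff]
        intro x hx
        have := (PySem.List.mem_pyRange_one).1 hx
        simp; omega
      have h2 : (PySem.List.pyRange 10 (10 + novo_nu) 1).filter (fun i => decide (10 ≤ i))
          = PySem.List.pyRange 10 (10 + novo_nu) 1 := by
        rw [List.filter_eq_self]
        intro x hx
        have := (PySem.List.mem_pyRange_one).1 hx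
        simp; omega
      rw [List.filter_append, h1, h2, List.nil_append]
      have hsh : PySem.List.pyRange 0 (10 + novo_nu - 10) 1
          = (PySem.List.pyRange 10 (10 + novo_nu) 1).map (fun i => i - 10) := by
        rw [PySem.List.pyRange_one 0 (10 + novo_nu - 10), PySem.List.pyRange_one 10 (10 + novo_nu),
            List.map_map]
        have : (10 + novo_nu - 10 - 0).toNat = (10 + novo_nu - 10).toNat := by norm_num
        rw [this]
        apply List.map_congr_left; intro k _; simp
      rw [hsh, List.map_map]
      apply List.map_congr_left; intro i _; simp [Function.comp]; ring
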